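-- pv_equiv track=rewrite | github.com/RumyantS97/MSDT | lab1/univers_set.py | interpretator
-- ===== SOURCE A (Python) =====
-- WEATHER = ['жарко',  # [0; 30] градусов
--            'тепло',
--            'холодно']
--
-- EMPLOYMENT = ['свободен',  # [0; 24] часы
--               'есть время',
--               'занят']
--
-- KNOWLEDGE_BASE = {'Если жарко и свободен, то': 'вероятно едем',
--                   'Если холодно или занят, то': 'не едем',
--                   'Если тепло и свободен, то': 'едем',
--                   'Если тепло и есть время, то': 'вероятно едем',
--                   'Если холодно и есть время, то': 'не едем',
--                   'Если тепло и занят, то': 'не едем'}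
--
-- def interpretator(temperature, hour):
--     if temperature < 15:
--         t = WEATHER[2]
--     elif temperature >= 15 and temperature <= 25:
--         t = WEATHER[1]
--     elif temperature > 25:
--         t = WEATHER[0]
--
--     if hour == 0:
--         emp = EMPLOYMENT[2]
--     elif hour > 0 and hour < 6:
--         emp = EMPLOYMENT[1]
--     elif hour >= 6:
--         emp = EMPLOYMENT[0]
--
--     key = KNOWLEDGE_BASE.keys()
--     for k in key:
--         if t in k and emp in k: return k
--     return 0
-- ===== SOURCE B (Python) =====
-- # B: same categorization cascades, but the substring scan over KNOWLEDGE_BASE keys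
-- # is replaced by a precomputed (t, emp)-keyed table mapping straight to the rule key.
-- TABLE = {('жарко', 'свободен'): 'Если жарко и свободен, то',
--          ('холодно', 'занят'): 'Если холодно или занят, то',
--          ('тепло', 'свободен'): 'Если тепло и свободен, то',
--          ('тепло', 'есть время'): 'Если тепло и есть время, то',
--          ('холодно', 'есть время'): 'Если холодно и есть время, то',
--          ('тепло', 'занят'): 'Если тепло и занят, то'}
--
-- def interpretator(temperature, hour):
--     if temperature < 15:
--         t = 'холодно'
--     elif 15 <= temperature <= 25:
--         t = 'тепло'
--     elif temperature > 25:
--         t = 'жарко'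
--
--     if hour == 0:
--         emp = 'занят'
--     elif 0 < hour < 6:
--         emp = 'есть время'
--     elif hour >= 6:
--         emp = 'свободен'
--
--     return TABLE.get((t, emp), 0)
-- ===== Notes on version B (the rewrite author's own statement) =====
-- stated objective: simpler
-- what changed: B keeps the two categorization cascades but replaces A's per-call substring scan over the KNOWLEDGE_BASE keys with a single precomputed (weather, employment)-keyed table looked up directly.
-- outside the precondition, e.g. on interpretator(30, 1): A returns 0, B returns 0; on interpretator(10, 7): A returns 0, B returns 0; on interpretator(20, -1): A raises UnboundLocalError, B raises UnboundLocalError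
import Mathlib
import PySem

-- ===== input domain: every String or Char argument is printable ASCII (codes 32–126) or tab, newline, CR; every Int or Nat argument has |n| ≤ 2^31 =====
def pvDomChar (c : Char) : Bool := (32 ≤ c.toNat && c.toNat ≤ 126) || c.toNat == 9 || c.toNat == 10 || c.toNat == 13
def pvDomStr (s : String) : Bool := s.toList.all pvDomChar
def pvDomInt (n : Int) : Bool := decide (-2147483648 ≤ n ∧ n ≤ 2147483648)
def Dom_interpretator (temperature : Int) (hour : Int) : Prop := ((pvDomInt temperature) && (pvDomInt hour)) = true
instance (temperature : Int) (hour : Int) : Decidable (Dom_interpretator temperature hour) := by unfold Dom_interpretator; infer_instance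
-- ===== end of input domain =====

-- B replaces A's substring scan over the knowledge-base keys with a precomputed
-- (weather, employment)-keyed table looked up directly; same value everywhere on Pre_.


-- ===== PORT A =====
def pvWEATHER : List String := ["жарко", "тепло", "холодно"]
def pvEMPLOYMENT : List String := ["свободен", "есть время", "занят"]
def pvKB_keys : List String :=
  ["Если жарко и свободен, то",
   "Если холодно или занят, то",
   "Если тепло и свободен, то",
   "Если тепло и есть время, то",
   "Если холодно и есть время, то",
   "Если тепло и занят, то"]

-- the 'for k in key' loop; [] case is Python's 'return 0' (not a string; excluded by Pre_)
def pvScan (t emp : String) : List String → Option String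
  | [] => none
  | k :: rest =>
      if PySem.Str.isIn t k && PySem.Str.isIn emp k then some k else pvScan t emp rest

def interpretator (temperature : Int) (hour : Int) : Option String :=
  let t? : Option String :=
    if temperature < 15 then PySem.List.pyGet? pvWEATHER 2
    else if temperature ≥ 15 && temperature ≤ 25 then PySem.List.pyGet? pvWEATHER 1
    else if temperature > 25 then PySem.List.pyGet? pvWEATHER 0
    else none   -- t unbound (unreachable for Int input)
  let emp? : Option String :=
    if hour == 0 then PySem.List.pyGet? pvEMPLOYMENT 2
    else if hour > 0 && hour < 6 then PySem.List.pyGet? pvEMPLOYMENT 1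
    else if hour ≥ 6 then PySem.List.pyGet? pvEMPLOYMENT 0
    else none   -- emp unbound: Python raises UnboundLocalError (excluded by Pre_)
  match t?, emp? with
  | some t, some emp => pvScan t emp pvKB_keys
  | _, _ => none

-- ===== PORT B =====
def pvTABLE : PySem.Dict (String × String) String :=
  PySem.Dict.ofList
  [(("жарко", "свободен"), "Если жарко и свободен, то"),
   (("холодно", "занят"), "Если холодно или занят, то"),
   (("тепло", "свободен"), "Если тепло и свободен, то"),
   (("тепло", "есть время"), "Если тепло и есть время, то"),
   (("холодно", "есть время"), "Если холодно и есть время, то"),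
   (("тепло", "занят"), "Если тепло и занят, то")]

def interpretator_alt (temperature : Int) (hour : Int) : Option String :=
  let t? : Option String :=
    if temperature < 15 then some "холодно"
    else if 15 ≤ temperature && temperature ≤ 25 then some "тепло"
    else if temperature > 25 then some "жарко"
    else none
  let emp? : Option String :=
    if hour == 0 then some "занят"
    else if 0 < hour && hour < 6 then some "есть время"
    else if hour ≥ 6 then some "свободен"
    else none
  -- TABLE.get((t, emp), 0); the 0 default is not a string (excluded by Pre_);
  -- an unbound t/emp (UnboundLocalError, excluded by Pre_) is the none case of bind
  t?.bind fun t => emp?.bind fun emp => PySem.Dict.get? pvTABLE (t, emp)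

-- ===== PRECONDITION & SPEC =====
-- Pre_ excludes hour < 0, where A raises UnboundLocalError, and the three (weather, employment)
-- pairs with no matching rule key, where A returns the int 0 — not a value of the declared
-- Option String type (B returns 0 / raises there too).
def Pre_interpretator (temperature : Int) (hour : Int) : Prop :=
  0 ≤ hour ∧ ¬(temperature > 25 ∧ hour < 6) ∧ ¬(temperature < 15 ∧ hour ≥ 6)
instance (temperature : Int) (hour : Int) : Decidable (Pre_interpretator temperature hour) := by
  unfold Pre_interpretator; infer_instance

def pvWitness_interpretator : Int × Int := (20, 3)

def Spec_interpretator (temperature : Int) (hour : Int) (out : Option String) : Prop := out = interpretator_alt temperature hour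
instance (temperature : Int) (hour : Int) (out : Option String) : Decidable (Spec_interpretator temperature hour out) := by unfold Spec_interpretator; infer_instance

-- ===== CLAIM (what is proved, stated in full; the proofs are below) =====
def Claim_equal_interpretator : Prop := ∀ (temperature : Int) (hour : Int), Dom_interpretator temperature hour → Pre_interpretator temperature hour → Spec_interpretator temperature hour (interpretator temperature hour)

-- ===== LEMMAS AND PROOFS =====

-- ===== VERDICT (by name: the statement is the Claim_ definition above) =====
theorem interpretator_spec : Claim_equal_interpretator := by
  intro temperature hour _ _
  unfold Spec_interpretator interpretator interpretator_alt
  split_ifs <;> decide
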